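-- pv_equiv track=rewrite | github.com/TitanRiri/Hitomezashi | hitomezashi gen.py | hitoTab
-- ===== SOURCE A (Python) =====
-- def hitoTab(lH, lV, n):
--     Tab, Vtab, Htab=[], [], []
--
--     #ranges
--     tH, tV=(n+1)*len(lH), (n+1)*len(lV)
--
--     #halfway transformation
--     for i in range(len(lV)):
--         Vtab.append([])
--         if lV[i]==1:
--             for j in range(tH):#vtab
--                 if j%(2*(n+1)) in range(n+2): Vtab[i].append(1)
--                 else: Vtab[i].append(0)
--         else:
--             for j in range(tH):
--                 if j%(2*(n+1)) in [0]+[i for i in range(n+1,2*(n+1))]: Vtab[i].append(1)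
--                 else: Vtab[i].append(0)
--     for i in range(len(lH)):#htab
--         Htab.append([])
--         if lH[i]==1:
--             for j in range(tV):
--                 if j%(2*(n+1)) in range(n+2): Htab[i].append(1)
--                 else: Htab[i].append(0)
--         else:
--             for j in range(tV):
--                 if j%(2*(n+1)) in [0]+[i for i in range(n+1,2*(n+1))]: Htab[i].append(1)
--                 else: Htab[i].append(0)
--
--     #0 filler
--     zVFill=[0 for i in range(tH)]
--     zHFill=[0 for i in range(tV)]
--
--     for i in range(len(Vtab)):#vtab
--         for j in range(1, n+1):
--             Vtab.insert((n+1)*i+j, zVFill)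
--     for i in range(len(Htab)):#htab
--         for j in range(1, n+1):
--             Htab.insert((n+1)*i+j, zHFill)
--
--     #composing
--     for i in range(len(Vtab)):
--         Tab.append([])
--         for j in range(len(Htab)):
--             Tab[i].append(Vtab[i][j] or Htab[j][i])
--
--     return Tab, (Htab, Vtab)
-- ===== SOURCE B (Python) =====
-- def hitoTab(lH, lV, n):
--     step = n + 1
--
--     def pattern(flag, length):
--         period = 2 * step
--         if flag == 1:
--             return [1 if j % period <= step else 0 for j in range(length)]
--         return [1 if (j % period == 0 or j % period >= step) else 0 for j in range(length)]
--
--     def table(flags, length):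
--         zero = [0] * length
--         rows = []
--         for f in flags:
--             rows.append(pattern(f, length))
--             rows.extend([zero] * (step - 1))
--         return rows
--
--     tH, tV = step * len(lH), step * len(lV)
--     Vtab = table(lV, tH)
--     Htab = table(lH, tV)
--     Tab = [[v or Htab[j][i] for j, v in enumerate(vrow)] for i, vrow in enumerate(Vtab)]
--     return Tab, (Htab, Vtab)
-- ===== Notes on version B (the rewrite author's own statement) =====
-- stated objective: simpler
-- what changed: B builds Vtab/Htab directly in final order (pattern row followed by n zero rows per flag, with arithmetic conditions rem<=n+1 / rem==0 or rem>=n+1 instead of range-membership lists), eliminating A's short-list construction and its shifting insert loops; the composition is a zip-style comprehension over enumerate instead of index-mutation of Tab.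
import Mathlib
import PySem

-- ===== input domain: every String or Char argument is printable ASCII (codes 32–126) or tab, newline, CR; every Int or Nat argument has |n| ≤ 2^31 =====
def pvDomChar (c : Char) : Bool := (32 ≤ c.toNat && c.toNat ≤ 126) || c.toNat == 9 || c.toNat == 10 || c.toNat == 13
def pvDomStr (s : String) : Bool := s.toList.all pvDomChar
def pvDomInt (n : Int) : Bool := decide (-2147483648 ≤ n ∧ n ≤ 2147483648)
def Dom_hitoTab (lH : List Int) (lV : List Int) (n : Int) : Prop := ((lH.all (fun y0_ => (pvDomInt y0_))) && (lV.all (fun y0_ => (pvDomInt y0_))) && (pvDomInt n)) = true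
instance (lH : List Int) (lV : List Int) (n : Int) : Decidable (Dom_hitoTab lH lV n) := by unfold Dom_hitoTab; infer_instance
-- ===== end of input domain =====

-- B builds Vtab/Htab directly in final order (pattern row + n zero rows per flag, arithmetic
-- parity conditions) instead of A's build-short-lists-then-shifting-insert phases: simpler.

-- ===== PORT A =====
-- Python's `x or y` on ints: x if truthy else y (shared by both ports)
def pyOrInt (a b : Int) : Int := if a ≠ 0 then a else b

def hitoTab (lH : List Int) (lV : List Int) (n : Int) : List (List Int) × (List (List Int) × List (List Int)) :=
  let tH : Int := (n+1) * PySem.List.len lH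
  let tV : Int := (n+1) * PySem.List.len lV
  -- halfway transformation (Vtab[i].append(…) modelled as pySetD at index i)
  let Vtab : List (List Int) :=
    (PySem.List.pyRange 0 (PySem.List.len lV) 1).foldl (fun Vtab i =>
      let Vtab := Vtab ++ [[]]
      if PySem.List.pyGetD lV i 0 = 1 then
        (PySem.List.pyRange 0 tH 1).foldl (fun Vtab j =>
          if PySem.Int.mod j (2*(n+1)) ∈ PySem.List.pyRange 0 (n+2) 1 then
            PySem.List.pySetD Vtab i (PySem.List.pyGetD Vtab i [] ++ [1])
          else
            PySem.List.pySetD Vtab i (PySem.List.pyGetD Vtab i [] ++ [0])) Vtab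
      else
        (PySem.List.pyRange 0 tH 1).foldl (fun Vtab j =>
          if PySem.Int.mod j (2*(n+1)) ∈ (0 :: PySem.List.pyRange (n+1) (2*(n+1)) 1) then
            PySem.List.pySetD Vtab i (PySem.List.pyGetD Vtab i [] ++ [1])
          else
            PySem.List.pySetD Vtab i (PySem.List.pyGetD Vtab i [] ++ [0])) Vtab) []
  let Htab : List (List Int) :=
    (PySem.List.pyRange 0 (PySem.List.len lH) 1).foldl (fun Htab i =>
      let Htab := Htab ++ [[]]
      if PySem.List.pyGetD lH i 0 = 1 then
        (PySem.List.pyRange 0 tV 1).foldl (fun Htab j =>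
          if PySem.Int.mod j (2*(n+1)) ∈ PySem.List.pyRange 0 (n+2) 1 then
            PySem.List.pySetD Htab i (PySem.List.pyGetD Htab i [] ++ [1])
          else
            PySem.List.pySetD Htab i (PySem.List.pyGetD Htab i [] ++ [0])) Htab
      else
        (PySem.List.pyRange 0 tV 1).foldl (fun Htab j =>
          if PySem.Int.mod j (2*(n+1)) ∈ (0 :: PySem.List.pyRange (n+1) (2*(n+1)) 1) then
            PySem.List.pySetD Htab i (PySem.List.pyGetD Htab i [] ++ [1])
          else
            PySem.List.pySetD Htab i (PySem.List.pyGetD Htab i [] ++ [0])) Htab) []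
  -- 0 filler
  let zVFill : List Int := (PySem.List.pyRange 0 tH 1).map (fun _ => 0)
  let zHFill : List Int := (PySem.List.pyRange 0 tV 1).map (fun _ => 0)
  -- insert-with-shift phases (range bound read before the loop mutates the list, as in Python)
  let Vtab := (PySem.List.pyRange 0 (PySem.List.len Vtab) 1).foldl (fun Vtab i =>
      (PySem.List.pyRange 1 (n+1) 1).foldl (fun Vtab j =>
        PySem.List.insert Vtab ((n+1)*i + j) zVFill) Vtab) Vtab
  let Htab := (PySem.List.pyRange 0 (PySem.List.len Htab) 1).foldl (fun Htab i =>
      (PySem.List.pyRange 1 (n+1) 1).foldl (fun Htab j =>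
        PySem.List.insert Htab ((n+1)*i + j) zHFill) Htab) Htab
  -- composing
  let Tab : List (List Int) :=
    (PySem.List.pyRange 0 (PySem.List.len Vtab) 1).foldl (fun Tab i =>
      let Tab := Tab ++ [[]]
      (PySem.List.pyRange 0 (PySem.List.len Htab) 1).foldl (fun Tab j =>
        PySem.List.pySetD Tab i (PySem.List.pyGetD Tab i [] ++
          [pyOrInt (PySem.List.pyGetD (PySem.List.pyGetD Vtab i []) j 0)
                   (PySem.List.pyGetD (PySem.List.pyGetD Htab j []) i 0)])) Tab) []
  (Tab, (Htab, Vtab))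

-- ===== PORT B =====
def hitoPattern (flag : Int) (n : Int) (length : Int) : List Int :=
  if flag = 1 then
    (PySem.List.pyRange 0 length 1).map (fun j =>
      if PySem.Int.mod j (2*(n+1)) ≤ n+1 then (1:Int) else 0)
  else
    (PySem.List.pyRange 0 length 1).map (fun j =>
      if PySem.Int.mod j (2*(n+1)) = 0 ∨ n+1 ≤ PySem.Int.mod j (2*(n+1)) then (1:Int) else 0)

def hitoTable (flags : List Int) (n : Int) (length : Int) : List (List Int) :=
  let zero : List Int := List.replicate length.toNat 0
  flags.foldl (fun rows f =>
    rows ++ [hitoPattern f n length] ++ List.replicate n.toNat zero) []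

def hitoTab_alt (lH : List Int) (lV : List Int) (n : Int) : List (List Int) × (List (List Int) × List (List Int)) :=
  let tH : Int := (n+1) * PySem.List.len lH
  let tV : Int := (n+1) * PySem.List.len lV
  let Vtab := hitoTable lV n tH
  let Htab := hitoTable lH n tV
  let Tab : List (List Int) :=
    (PySem.List.enumerate Vtab).map (fun iv =>
      (PySem.List.enumerate iv.2).map (fun jv =>
        pyOrInt jv.2 (PySem.List.pyGetD (PySem.List.pyGetD Htab jv.1 []) iv.1 0)))
  (Tab, (Htab, Vtab))

-- ===== PRECONDITION & SPEC =====
-- Pre_ excludes exactly the inputs where A raises IndexError: n < 0 with both lists nonempty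
-- (the pattern rows are empty there but len(Htab) > 0, so A's composing loop indexes out of range).
def Pre_hitoTab (lH : List Int) (lV : List Int) (n : Int) : Prop := 0 ≤ n ∨ lH = [] ∨ lV = []
instance (lH : List Int) (lV : List Int) (n : Int) : Decidable (Pre_hitoTab lH lV n) := by unfold Pre_hitoTab; infer_instance
def pvWitness_hitoTab : List Int × List Int × Int := ([1, 0], [0, 1], 1)

def Spec_hitoTab (lH : List Int) (lV : List Int) (n : Int) (out : List (List Int) × (List (List Int) × List (List Int))) : Prop := out = hitoTab_alt lH lV n
instance (lH : List Int) (lV : List Int) (n : Int) (out : List (List Int) × (List (List Int) × List (List Int))) : Decidable (Spec_hitoTab lH lV n out) := by unfold Spec_hitoTab; infer_instance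

-- ===== CLAIM (what is proved, stated in full; the proofs are below) =====
def Claim_equal_hitoTab : Prop := ∀ (lH : List Int) (lV : List Int) (n : Int), Dom_hitoTab lH lV n → Pre_hitoTab lH lV n → Spec_hitoTab lH lV n (hitoTab lH lV n)

-- ===== LEMMAS AND PROOFS =====

lemma appendMutate (js : List Int) (f : Int → Int) :
    ∀ (V : List (List Int)) (r : List Int),
    js.foldl (fun L j => PySem.List.pySetD L (V.length : Int) (PySem.List.pyGetD L (V.length : Int) [] ++ [f j])) (V ++ [r])
      = V ++ [r ++ js.map f] := by
  induction js with
  | nil => intro V r; simp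
  | cons j js ih =>
    intro V r
    have h1 : PySem.List.pyGetD (V ++ [r]) (V.length : Int) [] = r := by
      simp [PySem.List.pyGetD_natCast, List.getD]
    have h2 : PySem.List.pySetD (V ++ [r]) (V.length : Int) (r ++ [f j]) = V ++ [r ++ [f j]] := by
      simp [PySem.List.pySetD_natCast]
    simp only [List.foldl_cons, h1, h2, ih]
    simp

lemma innerInsert (z : List Int) (k : Nat) :
    ∀ (P rest : List (List Int)) (r : List Int),
    (PySem.List.pyRange 1 ((k:Int)+1) 1).foldl (fun L j => PySem.List.insert L ((P.length : Int) + j) z) (P ++ r :: rest)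
      = P ++ r :: (List.replicate k z ++ rest) := by
  induction k with
  | zero => intro P rest r; rw [PySem.List.pyRange_one_eq_nil (by omega)]; simp
  | succ k ih =>
    intro P rest r
    have hsplit : PySem.List.pyRange 1 ((k:Int)+1+1) 1 = PySem.List.pyRange 1 ((k:Int)+1) 1 ++ [(k:Int)+1] := by
      have := PySem.List.pyRange_one_succ_right (a:=1) (b:=(k:Int)+1) (by omega)
      simpa using this
    have hcast : ((k:Int)+1+1) = (((k+1:Nat)):Int) + 1 := by push_cast; ring
    rw [← hcast] at *
    rw [hsplit, List.foldl_append, ih]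
    have hpos : ((P.length : Int) + ((k:Int)+1)) = ((P.length + k + 1 : Nat) : Int) := by push_cast; ring
    rw [List.foldl_cons, List.foldl_nil, hpos,
        PySem.List.insert_natCast _ _ _ (by simp only [List.length_append, List.length_cons, List.length_replicate]; omega)]
    have hpre : P ++ r :: (List.replicate k z ++ rest) = (P ++ r :: List.replicate k z) ++ rest := by simp
    have hlen : (P ++ r :: List.replicate k z).length = P.length + k + 1 := by simp; omega
    rw [hpre, ← hlen, List.take_left, List.drop_left]
    simp [List.replicate_succ']

lemma outerInsert (z : List Int) (n : Int) (hn : 0 ≤ n) :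
    ∀ (rows : List (List Int)) (s : Nat) (P : List (List Int)), (P.length : Int) = (n+1) * s →
    (PySem.List.pyRange (s : Int) ((s : Int) + rows.length) 1).foldl (fun L i =>
        (PySem.List.pyRange 1 (n+1) 1).foldl (fun L j => PySem.List.insert L ((n+1)*i + j) z) L) (P ++ rows)
      = P ++ rows.flatMap (fun r => r :: List.replicate n.toNat z) := by
  intro rows
  induction rows with
  | nil =>
    intro s P hP
    rw [show ((s:Int) + (([] : List (List Int)).length : Int)) = (s:Int) by simp,
       PySem.List.pyRange_one_eq_nil (le_refl _)]
    simp
  | cons r rows ih =>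
    intro s P hP
    have hcons : PySem.List.pyRange (s : Int) ((s : Int) + (r :: rows).length) 1
        = (s : Int) :: PySem.List.pyRange ((s : Int) + 1) ((s : Int) + (r :: rows).length) 1 := by
      exact PySem.List.pyRange_one_cons (by simp)
    rw [hcons, List.foldl_cons]
    -- inner loop at index s
    have hk : (n+1) = ((n.toNat : Int) + 1) := by omega
    have hfun : (fun L j => PySem.List.insert L ((n+1)*(s:Int) + j) z)
        = (fun L j => PySem.List.insert L ((P.length : Int) + j) z) := by
      funext L j; rw [hP]
    have hinner : (PySem.List.pyRange 1 (n+1) 1).foldl (fun L j => PySem.List.insert L ((n+1)*(s:Int) + j) z) (P ++ r :: rows)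
        = P ++ r :: (List.replicate n.toNat z ++ rows) := by
      rw [hfun, hk, innerInsert]
    rw [hinner]
    have hre : P ++ r :: (List.replicate n.toNat z ++ rows) = (P ++ r :: List.replicate n.toNat z) ++ rows := by simp
    have hlen2 : (((P ++ r :: List.replicate n.toNat z).length : Int)) = (n+1) * ((s+1 : Nat) : Int) := by
      simp only [List.length_append, List.length_cons, List.length_replicate]
      push_cast
      rw [hP]; ring_nf; omega
    have hlen3 : ((s:Int) + 1) = (((s+1 : Nat)) : Int) := by push_cast; ring
    have hlen4 : ((s:Int) + (r :: rows).length) = (((s+1:Nat)) : Int) + rows.length := by push_cast [List.length_cons]; ring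
    rw [hre, hlen4, hlen3, ih (s+1) _ hlen2]
    simp

lemma outerBuild (body : List (List Int) → Int → List (List Int)) (row : Int → List Int)
    (hbody : ∀ (V : List (List Int)) (i : Int), i = (V.length : Int) → body V i = V ++ [row i]) :
    ∀ (m : Nat), (PySem.List.pyRange 0 (m : Int) 1).foldl body [] = (PySem.List.pyRange 0 (m : Int) 1).map row := by
  intro m
  induction m with
  | zero => rw [PySem.List.pyRange_one_eq_nil (by omega)]; simp
  | succ m ih =>
    have hsplit : PySem.List.pyRange 0 ((m+1 : Nat) : Int) 1 = PySem.List.pyRange 0 (m : Int) 1 ++ [(m : Int)] := by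
      have := PySem.List.pyRange_one_succ_right (a:=0) (b:=(m:Int)) (by omega)
      push_cast
      simpa using this
    rw [hsplit, List.foldl_append, List.map_append, ih, List.foldl_cons, List.foldl_nil]
    rw [hbody _ _ (by simp [PySem.List.length_pyRange_one])]
    simp

lemma zfillEq (t : Int) : (PySem.List.pyRange 0 t 1).map (fun _ => (0:Int)) = List.replicate t.toNat 0 := by
  rw [List.eq_replicate_iff]
  constructor
  · simp [PySem.List.length_pyRange_one]
  · intro b hb; simp at hb; exact hb.2



def rowA (n tH flag : Int) : List Int :=
  if flag = 1 then
    (PySem.List.pyRange 0 tH 1).map (fun j =>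
      if PySem.Int.mod j (2*(n+1)) ∈ PySem.List.pyRange 0 (n+2) 1 then (1:Int) else 0)
  else
    (PySem.List.pyRange 0 tH 1).map (fun j =>
      if PySem.Int.mod j (2*(n+1)) ∈ (0 :: PySem.List.pyRange (n+1) (2*(n+1)) 1) then (1:Int) else 0)

lemma rowEq (n tH flag : Int) (h : 0 ≤ n ∨ tH ≤ 0) : rowA n tH flag = hitoPattern flag n tH := by
  rcases h with h | h
  · have hpos : (0:Int) < 2*(n+1) := by omega
    unfold rowA hitoPattern
    by_cases hf : flag = 1
    · rw [if_pos hf, if_pos hf]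
      apply List.map_congr_left
      intro j hj
      have h0 := PySem.Int.mod_nonneg j hpos
      have hmem : PySem.Int.mod j (2*(n+1)) ∈ PySem.List.pyRange 0 (n+2) 1 ↔ PySem.Int.mod j (2*(n+1)) ≤ n+1 := by
        rw [PySem.List.mem_pyRange_one]; omega
      simp only [hmem]
    · rw [if_neg hf, if_neg hf]
      apply List.map_congr_left
      intro j hj
      have h0 := PySem.Int.mod_nonneg j hpos
      have h1 := PySem.Int.mod_lt j hpos
      have hmem : PySem.Int.mod j (2*(n+1)) ∈ (0 :: PySem.List.pyRange (n+1) (2*(n+1)) 1) ↔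
          (PySem.Int.mod j (2*(n+1)) = 0 ∨ n+1 ≤ PySem.Int.mod j (2*(n+1))) := by
        rw [List.mem_cons, PySem.List.mem_pyRange_one]; omega
      simp only [hmem]
  · unfold rowA hitoPattern
    rw [PySem.List.pyRange_one_eq_nil h]
    split <;> simp

lemma buildA (lst : List Int) (n tH : Int) :
    (PySem.List.pyRange 0 (PySem.List.len lst) 1).foldl (fun Vtab i =>
      let Vtab := Vtab ++ [[]]
      if PySem.List.pyGetD lst i 0 = 1 then
        (PySem.List.pyRange 0 tH 1).foldl (fun Vtab j =>
          if PySem.Int.mod j (2*(n+1)) ∈ PySem.List.pyRange 0 (n+2) 1 then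
            PySem.List.pySetD Vtab i (PySem.List.pyGetD Vtab i [] ++ [1])
          else
            PySem.List.pySetD Vtab i (PySem.List.pyGetD Vtab i [] ++ [0])) Vtab
      else
        (PySem.List.pyRange 0 tH 1).foldl (fun Vtab j =>
          if PySem.Int.mod j (2*(n+1)) ∈ (0 :: PySem.List.pyRange (n+1) (2*(n+1)) 1) then
            PySem.List.pySetD Vtab i (PySem.List.pyGetD Vtab i [] ++ [1])
          else
            PySem.List.pySetD Vtab i (PySem.List.pyGetD Vtab i [] ++ [0])) Vtab) []
    = lst.map (fun f => rowA n tH f) := by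
  rw [PySem.List.len_eq]
  have hmain := outerBuild (row := fun i => rowA n tH (PySem.List.pyGetD lst i 0))
    (body := fun Vtab i =>
      let Vtab := Vtab ++ [[]]
      if PySem.List.pyGetD lst i 0 = 1 then
        (PySem.List.pyRange 0 tH 1).foldl (fun Vtab j =>
          if PySem.Int.mod j (2*(n+1)) ∈ PySem.List.pyRange 0 (n+2) 1 then
            PySem.List.pySetD Vtab i (PySem.List.pyGetD Vtab i [] ++ [1])
          else
            PySem.List.pySetD Vtab i (PySem.List.pyGetD Vtab i [] ++ [0])) Vtab
      else
        (PySem.List.pyRange 0 tH 1).foldl (fun Vtab j =>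
          if PySem.Int.mod j (2*(n+1)) ∈ (0 :: PySem.List.pyRange (n+1) (2*(n+1)) 1) then
            PySem.List.pySetD Vtab i (PySem.List.pyGetD Vtab i [] ++ [1])
          else
            PySem.List.pySetD Vtab i (PySem.List.pyGetD Vtab i [] ++ [0])) Vtab)
    ?_ lst.length
  · rw [hmain]
    have hbase := PySem.List.map_pyGetD_pyRange_zero (xs := lst) (d := (0:Int))
    rw [PySem.List.len_eq] at hbase
    conv_rhs => rw [← hbase]
    rw [List.map_map]
    rfl
  · intro V i hi
    subst hi
    dsimp only
    unfold rowA
    by_cases hf : PySem.List.pyGetD lst ((V.length : Int)) 0 = 1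
    · rw [if_pos hf, if_pos hf]
      have hfun : (fun (L : List (List Int)) j =>
          if PySem.Int.mod j (2*(n+1)) ∈ PySem.List.pyRange 0 (n+2) 1 then
            PySem.List.pySetD L ((V.length : Int)) (PySem.List.pyGetD L ((V.length : Int)) [] ++ [1])
          else
            PySem.List.pySetD L ((V.length : Int)) (PySem.List.pyGetD L ((V.length : Int)) [] ++ [0]))
          = (fun L j => PySem.List.pySetD L ((V.length : Int)) (PySem.List.pyGetD L ((V.length : Int)) [] ++
              [(fun j => if PySem.Int.mod j (2*(n+1)) ∈ PySem.List.pyRange 0 (n+2) 1 then (1:Int) else 0) j])) := by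
        funext L j
        by_cases hc : PySem.Int.mod j (2*(n+1)) ∈ PySem.List.pyRange 0 (n+2) 1 <;> simp [hc]
      rw [hfun, appendMutate]
      simp
    · rw [if_neg hf, if_neg hf]
      have hfun : (fun (L : List (List Int)) j =>
          if PySem.Int.mod j (2*(n+1)) ∈ (0 :: PySem.List.pyRange (n+1) (2*(n+1)) 1) then
            PySem.List.pySetD L ((V.length : Int)) (PySem.List.pyGetD L ((V.length : Int)) [] ++ [1])
          else
            PySem.List.pySetD L ((V.length : Int)) (PySem.List.pyGetD L ((V.length : Int)) [] ++ [0]))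
          = (fun L j => PySem.List.pySetD L ((V.length : Int)) (PySem.List.pyGetD L ((V.length : Int)) [] ++
              [(fun j => if PySem.Int.mod j (2*(n+1)) ∈ (0 :: PySem.List.pyRange (n+1) (2*(n+1)) 1) then (1:Int) else 0) j])) := by
        funext L j
        by_cases hc : PySem.Int.mod j (2*(n+1)) ∈ (0 :: PySem.List.pyRange (n+1) (2*(n+1)) 1) <;> simp [hc]
      rw [hfun, appendMutate]
      simp

lemma foldlFixed (l : List Int) (acc : List (List Int)) : l.foldl (fun L _ => L) acc = acc := by
  induction l generalizing acc <;> simp [*]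

lemma insertPhase (z : List Int) (n : Int) (rows : List (List Int)) :
    (PySem.List.pyRange 0 (PySem.List.len rows) 1).foldl (fun L i =>
        (PySem.List.pyRange 1 (n+1) 1).foldl (fun L j => PySem.List.insert L ((n+1)*i + j) z) L) rows
      = rows.flatMap (fun r => r :: List.replicate n.toNat z) := by
  by_cases hn : 0 ≤ n
  · have := outerInsert z n hn rows 0 [] (by simp)
    simpa using this
  · have hnil : PySem.List.pyRange 1 (n+1) 1 = [] := PySem.List.pyRange_one_eq_nil (by omega)
    have hz : n.toNat = 0 := by omega
    simp only [hnil, List.foldl_nil, hz, List.replicate_zero]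
    rw [foldlFixed]
    simp

lemma composeEq (Vt Ht : List (List Int)) (hlen : ∀ r ∈ Vt, (r.length : Int) = (Ht.length : Int)) :
    (PySem.List.pyRange 0 (PySem.List.len Vt) 1).foldl (fun Tab i =>
      let Tab := Tab ++ [[]]
      (PySem.List.pyRange 0 (PySem.List.len Ht) 1).foldl (fun Tab j =>
        PySem.List.pySetD Tab i (PySem.List.pyGetD Tab i [] ++
          [pyOrInt (PySem.List.pyGetD (PySem.List.pyGetD Vt i []) j 0)
                   (PySem.List.pyGetD (PySem.List.pyGetD Ht j []) i 0)])) Tab) []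
    = (PySem.List.enumerate Vt).map (fun iv =>
        (PySem.List.enumerate iv.2).map (fun jv =>
          pyOrInt jv.2 (PySem.List.pyGetD (PySem.List.pyGetD Ht jv.1 []) iv.1 0))) := by
  simp only [PySem.List.len_eq]
  have hmain := outerBuild
    (body := fun Tab i =>
      let Tab := Tab ++ [[]]
      (PySem.List.pyRange 0 ((Ht.length : Int)) 1).foldl (fun Tab j =>
        PySem.List.pySetD Tab i (PySem.List.pyGetD Tab i [] ++
          [pyOrInt (PySem.List.pyGetD (PySem.List.pyGetD Vt i []) j 0)
                   (PySem.List.pyGetD (PySem.List.pyGetD Ht j []) i 0)])) Tab)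
    (row := fun i => (PySem.List.pyRange 0 ((Ht.length : Int)) 1).map (fun j =>
        pyOrInt (PySem.List.pyGetD (PySem.List.pyGetD Vt i []) j 0)
                (PySem.List.pyGetD (PySem.List.pyGetD Ht j []) i 0)))
    ?_ Vt.length
  · rw [hmain]
    rw [PySem.List.enumerate_eq_map_pyRange (d := ([] : List Int)), List.map_map]
    simp only [PySem.List.len_eq]
    apply List.map_congr_left
    intro i hi
    rw [PySem.List.mem_pyRange_one] at hi
    have hmem : PySem.List.pyGetD Vt i [] ∈ Vt := by
      apply PySem.List.pyGetD_mem
      simp [PySem.Raise.InRange]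
      omega
    have hl := hlen _ hmem
    dsimp only [Function.comp]
    rw [PySem.List.enumerate_eq_map_pyRange (d := (0:Int)), List.map_map]
    simp only [PySem.List.len_eq]
    rw [← hl]
    rfl
  · intro V i hi
    subst hi
    dsimp only
    rw [appendMutate (f := fun j =>
        pyOrInt (PySem.List.pyGetD (PySem.List.pyGetD Vt ((V.length : Int)) []) j 0)
                (PySem.List.pyGetD (PySem.List.pyGetD Ht j []) ((V.length : Int)) 0))]
    simp

lemma mapRow (lst : List Int) (n t : Int) (h : 0 ≤ n ∨ t ≤ 0 ∨ lst = []) :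
    lst.map (fun f => rowA n t f) = lst.map (fun f => hitoPattern f n t) := by
  rcases h with h | h | h
  · exact List.map_congr_left (fun f _ => rowEq n t f (Or.inl h))
  · exact List.map_congr_left (fun f _ => rowEq n t f (Or.inr h))
  · subst h; rfl

lemma tableBFlat (flags : List Int) (n length : Int) : hitoTable flags n length
    = flags.flatMap (fun f => hitoPattern f n length :: List.replicate n.toNat (List.replicate length.toNat 0)) := by
  unfold hitoTable
  dsimp only
  have hfun : (fun (rows : List (List Int)) f => rows ++ [hitoPattern f n length] ++ List.replicate n.toNat (List.replicate length.toNat (0:Int)))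
      = fun rows f => rows ++ ([hitoPattern f n length] ++ List.replicate n.toNat (List.replicate length.toNat (0:Int))) := by
    funext rows f; simp
  rw [hfun, PySem.List.foldl_append_eq_flatMap]
  simp

lemma length_hitoPattern (flag n length : Int) : (hitoPattern flag n length).length = length.toNat := by
  unfold hitoPattern
  split <;> simp [PySem.List.length_pyRange_one]

lemma mem_hitoTable_length (flags : List Int) (n length : Int) :
    ∀ r ∈ hitoTable flags n length, r.length = length.toNat := by
  intro r hr
  rw [tableBFlat] at hr
  rw [List.mem_flatMap] at hr
  obtain ⟨f, _, hf⟩ := hr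
  rcases List.mem_cons.mp hf with h | h
  · subst h; exact length_hitoPattern f n length
  · rw [List.eq_of_mem_replicate h]; simp

lemma length_hitoTable (flags : List Int) (n length : Int) :
    (hitoTable flags n length).length = flags.length * (1 + n.toNat) := by
  rw [tableBFlat, List.length_flatMap]
  have h1 : (flags.map (fun f => (hitoPattern f n length :: List.replicate n.toNat (List.replicate length.toNat (0:Int))).length))
      = flags.map (fun _ => 1 + n.toNat) := List.map_congr_left (fun f _ => by simp [Nat.add_comm])
  rw [h1, List.map_const', List.sum_replicate, smul_eq_mul]

-- ===== VERDICT (by name: the statement is the Claim_ definition above) =====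
theorem hitoTab_spec : Claim_equal_hitoTab := by
  intro lH lV n hdom hpre
  unfold Spec_hitoTab hitoTab hitoTab_alt
  dsimp only
  rw [buildA lV n ((n+1) * PySem.List.len lH), buildA lH n ((n+1) * PySem.List.len lV)]
  rw [insertPhase, insertPhase]
  have hVcond : (0:Int) ≤ n ∨ (n+1) * PySem.List.len lH ≤ 0 ∨ lV = [] := by
    rcases hpre with h | h | h
    · exact Or.inl h
    · subst h; right; left; simp
    · exact Or.inr (Or.inr h)
  have hHcond : (0:Int) ≤ n ∨ (n+1) * PySem.List.len lV ≤ 0 ∨ lH = [] := by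
    rcases hpre with h | h | h
    · exact Or.inl h
    · exact Or.inr (Or.inr h)
    · subst h; right; left; simp
  rw [mapRow lV n ((n+1) * PySem.List.len lH) hVcond, mapRow lH n ((n+1) * PySem.List.len lV) hHcond]
  rw [zfillEq, zfillEq]
  rw [List.flatMap_map, List.flatMap_map]
  rw [← tableBFlat lV n ((n+1) * PySem.List.len lH), ← tableBFlat lH n ((n+1) * PySem.List.len lV)]
  have hlen : ∀ r ∈ hitoTable lV n ((n+1) * PySem.List.len lH),
      (r.length : Int) = ((hitoTable lH n ((n+1) * PySem.List.len lV)).length : Int) := by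
    intro r hr
    rw [mem_hitoTable_length lV n ((n+1) * PySem.List.len lH) r hr,
        length_hitoTable lH n ((n+1) * PySem.List.len lV)]
    rcases hpre with h | h | h
    · have hcast : ((n:Int) + 1) * PySem.List.len lH = ((lH.length * (1 + n.toNat) : Nat) : Int) := by
        simp only [PySem.List.len_eq]
        push_cast [Int.toNat_of_nonneg h]
        ring
      rw [hcast, Int.toNat_natCast]
    · subst h; simp
    · subst h; simp [hitoTable] at hr
  rw [composeEq _ _ hlen]
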